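-- pv_equiv track=rewrite | github.com/Userd-uh/LaLapad2-Editor | app.py | update_conf
-- ===== SOURCE A (Python) =====
-- def update_conf(original, new_cfg):
--     lines = original.splitlines()
--     result, done = [], set()
--     for line in lines:
--         s = line.strip()
--         if s and not s.startswith('#') and '=' in s:
--             k = s.split('=')[0].strip()
--             if k in new_cfg:
--                 result.append(f'{k}={new_cfg[k]}')
--                 done.add(k)
--             else:
--                 result.append(line)
--         else:
--             result.append(line)
--     for k, v in new_cfg.items():
--         if k not in done:
--             result.append(f'{k}={v}')
--     return '\n'.join(result)
-- ===== SOURCE B (Python) =====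
-- def update_conf(original, new_cfg):
--     lines = original.splitlines()
--     # First pass: index every config line's key to the list of line numbers that carry it.
--     index = {}
--     for i, line in enumerate(lines):
--         s = line.strip()
--         if s and not s.startswith('#') and '=' in s:
--             index.setdefault(s.split('=')[0].strip(), []).append(i)
--     # Second pass: drive the rewrite from new_cfg, patching indexed positions in place;
--     # keys with no indexed line are collected for the tail.
--     tail = []
--     for k, v in new_cfg.items():
--         if k in index:
--             for i in index[k]:
--                 lines[i] = f'{k}={v}'
--         else:
--             tail.append(f'{k}={v}')
--     return '\n'.join(lines + tail)
-- ===== Notes on version B (the rewrite author's own statement) =====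
-- stated objective: alternative
-- what changed: Inverted the traversal: instead of A's single pass over the lines that tests each line's key against new_cfg while threading a mutable `done` set, B first builds an index {key: [line numbers]} from the file, then drives the rewrite from new_cfg, patching the indexed positions in place and collecting unindexed keys for the tail.
import Mathlib
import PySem

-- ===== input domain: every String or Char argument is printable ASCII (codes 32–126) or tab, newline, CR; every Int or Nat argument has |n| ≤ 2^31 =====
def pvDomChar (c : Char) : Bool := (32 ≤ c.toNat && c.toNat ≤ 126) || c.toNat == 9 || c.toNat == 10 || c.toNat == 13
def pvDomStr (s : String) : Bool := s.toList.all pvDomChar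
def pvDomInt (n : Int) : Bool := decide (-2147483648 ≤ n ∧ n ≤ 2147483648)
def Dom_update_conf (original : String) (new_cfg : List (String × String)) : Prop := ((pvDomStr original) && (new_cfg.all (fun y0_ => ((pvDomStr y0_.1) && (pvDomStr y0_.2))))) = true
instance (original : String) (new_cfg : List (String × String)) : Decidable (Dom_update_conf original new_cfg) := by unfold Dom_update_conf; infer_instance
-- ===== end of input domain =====

-- B inverts the traversal: it indexes the file's keys to line numbers in one pass, then drives the
-- rewrite from new_cfg, patching indexed positions and collecting the rest; alternative decomposition, no speed claim.

-- ===== PORT A =====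
-- new_cfg is a Python dict: modelled as PySem.Dict built from the association list.
-- 's.split("=")[0]' is ported as .headD "" — split? with a nonempty separator always returns a nonempty list, so [0] never raises.
def update_conf (original : String) (new_cfg : List (String × String)) : String :=
  let d := PySem.Dict.ofList new_cfg
  let lines := PySem.Str.splitlines original
  let st := lines.foldl (fun (st : List String × PySem.Set String) line =>
      let s := PySem.Str.strip line
      if (!(s == "") && !(PySem.Str.startswith s "#") && PySem.Str.isIn "=" s) then
        let k := PySem.Str.strip (((PySem.Str.split? s "=").getD []).headD "")
        if d.contains k then
          (st.1 ++ [k ++ "=" ++ d.getD k ""], st.2.add k)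
        else
          (st.1 ++ [line], st.2)
      else
        (st.1 ++ [line], st.2)) ([], PySem.Set.empty)
  let result := d.items.foldl (fun acc kv =>
      if !(PySem.Set.contains st.2 kv.1) then acc ++ [kv.1 ++ "=" ++ kv.2] else acc) st.1
  PySem.Str.join "\n" result

-- ===== PORT B =====
-- B's parse of one line (blank / '#' / no-'=' lines give none); shared shape with A's test, factored as in Source B's first pass.
def pvKeyOf? (line : String) : Option String :=
  let s := PySem.Str.strip line
  if (!(s == "") && !(PySem.Str.startswith s "#") && PySem.Str.isIn "=" s) then
    some (PySem.Str.strip (((PySem.Str.split? s "=").getD []).headD ""))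
  else
    none

-- Source B's first pass: index = {}; for i, line in enumerate(lines): … index.setdefault(k, []).append(i)
-- (setdefault(k, []).append(i) is exactly Dict.modify k [] (· ++ [i]))
def pvIndex (lines : List String) : PySem.Dict String (List Int) :=
  (PySem.List.enumerate lines).foldl (fun d p =>
    match pvKeyOf? p.2 with
    | some k => d.modify k [] (· ++ [p.1])
    | none => d) PySem.Dict.empty

def update_conf_alt (original : String) (new_cfg : List (String × String)) : String :=
  let d := PySem.Dict.ofList new_cfg
  let lines := PySem.Str.splitlines original
  let index := pvIndex lines
  -- second pass: patch lines in place at the indexed positions, collect the rest in tail.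
  -- indices stored by enumerate are ≥ 0, so 'lines[i] = …' is List.set at i.toNat exactly.
  let st := d.items.foldl (fun (st : List String × List String) kv =>
      if index.contains kv.1 then
        ((index.getD kv.1 []).foldl (fun ls i => ls.set i.toNat (kv.1 ++ "=" ++ kv.2)) st.1, st.2)
      else
        (st.1, st.2 ++ [kv.1 ++ "=" ++ kv.2])) (lines, [])
  PySem.Str.join "\n" (st.1 ++ st.2)

-- ===== PRECONDITION & SPEC =====
def Spec_update_conf (original : String) (new_cfg : List (String × String)) (out : String) : Prop := out = update_conf_alt original new_cfg
instance (original : String) (new_cfg : List (String × String)) (out : String) : Decidable (Spec_update_conf original new_cfg out) := by unfold Spec_update_conf; infer_instance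

-- ===== CLAIM (what is proved, stated in full; the proofs are below) =====
def Claim_equal_update_conf : Prop := ∀ (original : String) (new_cfg : List (String × String)), Dom_update_conf original new_cfg → Spec_update_conf original new_cfg (update_conf original new_cfg)

-- ===== LEMMAS AND PROOFS =====

-- the per-line output of A's loop, expressed through B's parse
def pvMapLine (d : PySem.Dict String String) (line : String) : String :=
  match pvKeyOf? line with
  | some k => if d.contains k then k ++ "=" ++ d.getD k "" else line
  | none => line

-- the per-line update of A's `done` set, expressed through B's parse
def pvAddKey (d : PySem.Dict String String) (dn : PySem.Set String) (line : String) : PySem.Set String :=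
  match pvKeyOf? line with
  | some k => if d.contains k then dn.add k else dn
  | none => dn

theorem stepA_eq (d : PySem.Dict String String) (st : List String × PySem.Set String) (line : String) :
    (let s := PySem.Str.strip line
     if (!(s == "") && !(PySem.Str.startswith s "#") && PySem.Str.isIn "=" s) then
       let k := PySem.Str.strip (((PySem.Str.split? s "=").getD []).headD "")
       if d.contains k then
         (st.1 ++ [k ++ "=" ++ d.getD k ""], st.2.add k)
       else
         (st.1 ++ [line], st.2)
     else
       (st.1 ++ [line], st.2))
    = (st.1 ++ [pvMapLine d line], pvAddKey d st.2 line) := by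
  simp only [pvMapLine, pvAddKey, pvKeyOf?]
  split
  · simp
    split <;> simp
  · simp

theorem foldA_fst (d : PySem.Dict String String) (lines : List String)
    (acc : List String) (dn : PySem.Set String) :
    (lines.foldl (fun (st : List String × PySem.Set String) line =>
      (st.1 ++ [pvMapLine d line], pvAddKey d st.2 line)) (acc, dn)).1
    = acc ++ lines.map (pvMapLine d) := by
  induction lines generalizing acc dn with
  | nil => simp
  | cons l t ih => simp [ih]

theorem foldA_snd_mem (d : PySem.Dict String String) (lines : List String)
    (acc : List String) (dn : PySem.Set String) (x : String) :
    x ∈ (lines.foldl (fun (st : List String × PySem.Set String) line =>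
      (st.1 ++ [pvMapLine d line], pvAddKey d st.2 line)) (acc, dn)).2
    ↔ x ∈ dn ∨ (∃ l ∈ lines, pvKeyOf? l = some x ∧ d.contains x = true) := by
  induction lines generalizing acc dn with
  | nil => simp
  | cons l t ih =>
    have hx : x ∈ pvAddKey d dn l ↔ x ∈ dn ∨ (pvKeyOf? l = some x ∧ d.contains x = true) := by
      unfold pvAddKey
      cases h : pvKeyOf? l with
      | none => simp
      | some k =>
        by_cases hc : d.contains k = true
        · simp only [hc, if_pos, PySem.Set.mem_add]
          constructor
          · rintro (h1 | rfl)
            · exact Or.inl h1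
            · exact Or.inr ⟨rfl, hc⟩
          · rintro (h1 | ⟨hk, _⟩)
            · exact Or.inl h1
            · cases hk; exact Or.inr rfl
        · simp only [hc, if_neg, Bool.false_eq_true, not_false_iff]
          constructor
          · exact Or.inl
          · rintro (h1 | ⟨hk, hc'⟩)
            · exact h1
            · cases hk; exact absurd hc' hc
    simp only [List.foldl_cons]
    rw [List.exists_mem_cons_iff, ih, hx]
    exact or_assoc

-- the values of B's index: getD after the building fold
theorem getD_pvIndexFold (l : List (Int × String)) (d : PySem.Dict String (List Int)) (k : String) :
    (l.foldl (fun d p =>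
      match pvKeyOf? p.2 with
      | some k' => d.modify k' [] (· ++ [p.1])
      | none => d) d).getD k []
    = d.getD k [] ++ (l.filter (fun p => pvKeyOf? p.2 == some k)).map (·.1) := by
  induction l generalizing d with
  | nil => simp
  | cons p t ih =>
    simp only [List.foldl_cons]
    cases h : pvKeyOf? p.2 with
    | none => simp [ih, h]
    | some k' =>
      by_cases hk : k' = k
      · subst hk
        simp [ih, h, PySem.Dict.getD_modify_self]
      · have hne : k ≠ k' := fun hh => hk hh.symm
        have : (some k' == some k) = false := by
          simp [hk]
        simp [ih, h, PySem.Dict.getD_modify_of_ne _ _ _ hne, this]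

theorem contains_pvIndexFold (l : List (Int × String)) (d : PySem.Dict String (List Int)) (k : String) :
    (l.foldl (fun d p =>
      match pvKeyOf? p.2 with
      | some k' => d.modify k' [] (· ++ [p.1])
      | none => d) d).contains k
    = (d.contains k || l.any (fun p => pvKeyOf? p.2 == some k)) := by
  induction l generalizing d with
  | nil => simp
  | cons p t ih =>
    simp only [List.foldl_cons, List.any_cons]
    cases h : pvKeyOf? p.2 with
    | none => simp [ih]
    | some k' =>
      rw [ih, PySem.Dict.contains_modify]
      by_cases hk : k = k'
      · subst hk; simp
      · have h1 : (k == k') = false := by simp [hk]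
        have h2 : (some k' == some k) = false := by
          simp only [beq_eq_false_iff_ne, ne_eq, Option.some.injEq]
          exact fun hh => hk hh.symm
        rw [h1, h2, Bool.false_or, Bool.false_or]

-- membership in an index entry: exactly the line numbers carrying key k
theorem mem_getD_pvIndex (lines : List String) (k : String) (i : Int) :
    i ∈ (pvIndex lines).getD k []
    ↔ ∃ (j : Nat), ∃ (h : j < lines.length), i = (j : Int) ∧ pvKeyOf? lines[j] = some k := by
  unfold pvIndex
  rw [getD_pvIndexFold]
  simp only [PySem.Dict.getD_empty, List.nil_append, List.mem_map, List.mem_filter]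
  constructor
  · rintro ⟨p, ⟨hp, hkey⟩, rfl⟩
    rw [PySem.List.mem_enumerate_iff] at hp
    obtain ⟨j, hj, rfl⟩ := hp
    exact ⟨j, hj, by simpa using hkey⟩
  · rintro ⟨j, hj, rfl, hkey⟩
    refine ⟨((j : Int), lines[j]), ⟨?_, by simpa using hkey⟩, rfl⟩
    rw [PySem.List.mem_enumerate_iff]
    exact ⟨j, hj, by simp⟩

theorem any_enumerate_key (t : List String) (k : String) (s : Int) :
    (PySem.List.enumerate t s).any (fun p => pvKeyOf? p.2 == some k)
    = t.any (fun line => pvKeyOf? line == some k) := by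
  induction t generalizing s with
  | nil => simp [PySem.List.enumerate]
  | cons a b ih =>
    rw [PySem.List.enumerate_cons]
    simp only [List.any_cons]
    rw [ih]

theorem contains_pvIndex (lines : List String) (k : String) :
    (pvIndex lines).contains k = lines.any (fun line => pvKeyOf? line == some k) := by
  unfold pvIndex
  rw [contains_pvIndexFold, any_enumerate_key]
  simp

-- the inner patching fold, pointwise
theorem foldl_set_getElem? (idxs : List Int) (x : String) (ls : List String) (j : Nat)
    (hj : j < ls.length) :
    (idxs.foldl (fun ls i => ls.set i.toNat x) ls)[j]?
    = if ∃ i ∈ idxs, i.toNat = j then some x else ls[j]? := by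
  induction idxs generalizing ls with
  | nil => simp
  | cons i t ih =>
    simp only [List.foldl_cons]
    have hlen : (ls.set i.toNat x).length = ls.length := by simp
    rw [ih (ls.set i.toNat x) (by omega)]
    by_cases hmem : ∃ i' ∈ t, i'.toNat = j
    · simp [hmem]
    · by_cases hi : i.toNat = j
      · subst hi
        simp [hmem, List.getElem?_set_self hj]
      · simp [hmem, hi, List.getElem?_set_ne hi]

theorem foldl_set_length (idxs : List Int) (x : String) (ls : List String) :
    (idxs.foldl (fun ls i => ls.set i.toNat x) ls).length = ls.length := by
  induction idxs generalizing ls with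
  | nil => rfl
  | cons i t ih => simp [ih]

-- the outer patching fold of B, pointwise: driven from new_cfg's items, it produces A's per-line value
theorem outer_length (lines0 : List String) (its : List (String × String)) (ls : List String) :
    (its.foldl (fun ls kv =>
      if (pvIndex lines0).contains kv.1 then
        ((pvIndex lines0).getD kv.1 []).foldl (fun ls i => ls.set i.toNat (kv.1 ++ "=" ++ kv.2)) ls
      else ls) ls).length = ls.length := by
  induction its generalizing ls with
  | nil => rfl
  | cons kv t ih =>
    simp only [List.foldl_cons]
    split
    · rw [ih, foldl_set_length]
    · rw [ih]

theorem outer_getElem (lines0 : List String) (d : PySem.Dict String String)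
    (its : List (String × String)) (hval : ∀ kv ∈ its, d.getD kv.1 "" = kv.2)
    (ls : List String) (hlen : ls.length = lines0.length) (j : Nat) (hj : j < lines0.length) :
    (its.foldl (fun ls kv =>
      if (pvIndex lines0).contains kv.1 then
        ((pvIndex lines0).getD kv.1 []).foldl (fun ls i => ls.set i.toNat (kv.1 ++ "=" ++ kv.2)) ls
      else ls) ls)[j]?
    = match pvKeyOf? lines0[j] with
      | some k => if its.any (fun kv => kv.1 == k) then some (k ++ "=" ++ d.getD k "") else ls[j]?
      | none => ls[j]? := by
  induction its generalizing ls with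
  | nil => cases h : pvKeyOf? lines0[j] <;> simp
  | cons kv t ih =>
    simp only [List.foldl_cons]
    have hval' : ∀ p ∈ t, d.getD p.1 "" = p.2 := fun p hp => hval p (List.mem_cons_of_mem _ hp)
    -- whether the head item touches position j
    by_cases htouch : pvKeyOf? lines0[j] = some kv.1
    · -- it does: index.contains kv.1 holds, and j is set to kv.1 ++ "=" ++ kv.2
      have hcontains : (pvIndex lines0).contains kv.1 = true := by
        rw [contains_pvIndex, List.any_eq_true]
        exact ⟨lines0[j], List.getElem_mem hj, by simp [htouch]⟩
      have hjin : ∃ i ∈ (pvIndex lines0).getD kv.1 [], i.toNat = j := by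
        refine ⟨(j : Int), ?_, by simp⟩
        rw [mem_getD_pvIndex]
        exact ⟨j, hj, rfl, htouch⟩
      rw [hcontains, if_pos rfl]
      have hlen' : (((pvIndex lines0).getD kv.1 []).foldl
          (fun ls i => ls.set i.toNat (kv.1 ++ "=" ++ kv.2)) ls).length = lines0.length := by
        rw [foldl_set_length]; exact hlen
      rw [ih hval' _ hlen']
      rw [foldl_set_getElem? _ _ _ _ (by omega), if_pos hjin]
      have hv : d.getD kv.1 "" = kv.2 := hval kv (List.mem_cons_self)
      simp only [htouch, List.any_cons, BEq.rfl, Bool.true_or, if_pos, hv]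
      split <;> rfl
    · -- it does not: position j is untouched by the head item
      have hnot : ¬ ∃ i ∈ (pvIndex lines0).getD kv.1 [], i.toNat = j := by
        rintro ⟨i, hi, hij⟩
        rw [mem_getD_pvIndex] at hi
        obtain ⟨j', hj', rfl, hkey⟩ := hi
        have : j' = j := by omega
        subst this
        exact htouch hkey
      have huntouched : (if (pvIndex lines0).contains kv.1 then
          ((pvIndex lines0).getD kv.1 []).foldl (fun ls i => ls.set i.toNat (kv.1 ++ "=" ++ kv.2)) ls
        else ls)[j]? = ls[j]? := by
        split
        · rw [foldl_set_getElem? _ _ _ _ (by omega), if_neg hnot]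
        · rfl
      have hlen' : (if (pvIndex lines0).contains kv.1 then
          ((pvIndex lines0).getD kv.1 []).foldl (fun ls i => ls.set i.toNat (kv.1 ++ "=" ++ kv.2)) ls
        else ls).length = lines0.length := by
        split
        · rw [foldl_set_length]; exact hlen
        · exact hlen
      rw [ih hval' _ hlen', huntouched]
      cases h : pvKeyOf? lines0[j] with
      | none => rfl
      | some k =>
        have hkf : (kv.1 == k) = false := by
          rw [beq_eq_false_iff_ne]
          intro hh
          exact htouch (by rw [h, hh])
        simp only [List.any_cons, hkf, Bool.false_or]

-- items.any on the first component is contains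
theorem items_any_fst_eq_contains (d : PySem.Dict String String) (k : String) :
    d.items.any (fun kv => kv.1 == k) = d.contains k := by
  rcases h : d.contains k with _ | _
  · rw [List.any_eq_false]
    intro kv hkv hbeq
    have : kv.1 = k := by simpa using hbeq
    subst this
    have := (PySem.Dict.contains_iff_mem_keys d kv.1).2 (PySem.Dict.mem_keys_of_mem_items d hkv)
    rw [h] at this; cases this
  · rw [List.any_eq_true]
    rw [PySem.Dict.contains_iff_mem_keys] at h
    simp only [PySem.Dict.keys, List.mem_map] at h
    obtain ⟨kv, hkv, rfl⟩ := h
    exact ⟨kv, hkv, by simp⟩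

-- B's patched first component equals A's mapped lines
theorem patched_eq_map (d : PySem.Dict String String) (hnd : d.keys.Nodup) (lines0 : List String) :
    (d.items.foldl (fun ls kv =>
      if (pvIndex lines0).contains kv.1 then
        ((pvIndex lines0).getD kv.1 []).foldl (fun ls i => ls.set i.toNat (kv.1 ++ "=" ++ kv.2)) ls
      else ls) lines0)
    = lines0.map (pvMapLine d) := by
  have hval : ∀ kv ∈ d.items, d.getD kv.1 "" = kv.2 := by
    rintro ⟨k, v⟩ hkv
    exact PySem.Dict.getD_of_mem_items d hkv hnd ""
  apply List.ext_getElem?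
  intro j
  by_cases hj : j < lines0.length
  · rw [outer_getElem lines0 d d.items hval lines0 rfl j hj]
    rw [List.getElem?_map]
    rw [List.getElem?_eq_getElem hj]
    simp only [Option.map_some]
    unfold pvMapLine
    cases h : pvKeyOf? lines0[j] with
    | none => simp
    | some k =>
      simp only [items_any_fst_eq_contains]
      rcases hc : d.contains k with _ | _ <;> simp
  · have h1 : lines0.length ≤ j := by omega
    rw [List.getElem?_eq_none (by rw [outer_length]; omega),
        List.getElem?_eq_none (by simpa using h1)]

-- B's second pass is two independent accumulators: the patched lines and the tail
theorem foldB_split (lines : List String) (its : List (String × String))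
    (ls tl : List String) :
    (its.foldl (fun (st : List String × List String) kv =>
      if (pvIndex lines).contains kv.1 then
        (((pvIndex lines).getD kv.1 []).foldl (fun ls i => ls.set i.toNat (kv.1 ++ "=" ++ kv.2)) st.1, st.2)
      else
        (st.1, st.2 ++ [kv.1 ++ "=" ++ kv.2])) (ls, tl))
    = (its.foldl (fun ls kv =>
        if (pvIndex lines).contains kv.1 then
          ((pvIndex lines).getD kv.1 []).foldl (fun ls i => ls.set i.toNat (kv.1 ++ "=" ++ kv.2)) ls
        else ls) ls,
       its.foldl (fun tl kv =>
        if !((pvIndex lines).contains kv.1) then tl ++ [kv.1 ++ "=" ++ kv.2] else tl) tl) := by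
  induction its generalizing ls tl with
  | nil => rfl
  | cons kv t ih =>
    simp only [List.foldl_cons]
    rcases hc : (pvIndex lines).contains kv.1 with _ | _ <;> simp [ih]

-- ===== VERDICT (by name: the statement is the Claim_ definition above) =====
theorem update_conf_spec : Claim_equal_update_conf := by
  intro original new_cfg _
  unfold Spec_update_conf
  simp only [update_conf, update_conf_alt]
  set d := PySem.Dict.ofList new_cfg with hd
  set lines := PySem.Str.splitlines original with hl
  -- A's loop body in terms of pvMapLine / pvAddKey
  have hstep : (fun (st : List String × PySem.Set String) line =>
      let s := PySem.Str.strip line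
      if (!(s == "") && !(PySem.Str.startswith s "#") && PySem.Str.isIn "=" s) then
        let k := PySem.Str.strip (((PySem.Str.split? s "=").getD []).headD "")
        if d.contains k then
          (st.1 ++ [k ++ "=" ++ d.getD k ""], st.2.add k)
        else
          (st.1 ++ [line], st.2)
      else
        (st.1 ++ [line], st.2))
      = (fun (st : List String × PySem.Set String) line =>
        (st.1 ++ [pvMapLine d line], pvAddKey d st.2 line)) := by
    funext st line; exact stepA_eq d st line
  rw [hstep]
  rw [PySem.List.foldl_append_if (fun kv => !(PySem.Set.contains
        (lines.foldl (fun (st : List String × PySem.Set String) line =>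
          (st.1 ++ [pvMapLine d line], pvAddKey d st.2 line)) ([], PySem.Set.empty)).2 kv.1))
      (fun kv => kv.1 ++ "=" ++ kv.2) d.items _]
  rw [foldA_fst, List.nil_append]
  rw [foldB_split]
  rw [PySem.List.foldl_append_if (fun kv : String × String => !((pvIndex lines).contains kv.1))
      (fun kv => kv.1 ++ "=" ++ kv.2) d.items []]
  rw [patched_eq_map d (PySem.Dict.nodup_keys_ofList new_cfg) lines, List.nil_append]
  -- the two leftover filters coincide on d.items
  have hfilter : d.items.filter (fun kv =>
        !(PySem.Set.contains (lines.foldl (fun (st : List String × PySem.Set String) line =>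
          (st.1 ++ [pvMapLine d line], pvAddKey d st.2 line)) ([], PySem.Set.empty)).2 kv.1))
      = d.items.filter (fun kv => !((pvIndex lines).contains kv.1)) := by
    apply List.filter_congr
    intro kv hkv
    have hck : d.contains kv.1 = true := by
      rw [PySem.Dict.contains_iff_mem_keys]
      exact PySem.Dict.mem_keys_of_mem_items _ hkv
    have hb : ∀ (b c : Bool), (b = true ↔ c = true) → b = c := by decide
    apply congrArg
    apply hb
    rw [PySem.Set.contains_iff, foldA_snd_mem, contains_pvIndex, List.any_eq_true]
    constructor
    · rintro (h0 | ⟨l, hl', hk, _⟩)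
      · exact absurd h0 (by simp [PySem.Set.empty])
      · exact ⟨l, hl', by simp [hk]⟩
    · rintro ⟨l, hl', hk⟩
      exact Or.inr ⟨l, hl', by simpa using hk, hck⟩
  rw [hfilter]
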